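-- pv_equiv track=rewrite | github.com/dongklee42/Algorithms-for-Programming | programmers/sort_01.py | comb_digits
-- ===== SOURCE A (Python) =====
-- def comb_digits(num_list):
--     comb_list = []
--     for i, n in enumerate(num_list):
--         num = 0
--         num += num_list[i]
--         for j in range(len(num_list)):
--             if i != j:
--                 num = (num * 10**(len(str(num_list[j])))) + num_list[j]
--         comb_list.append(num)
--     return comb_list
-- ===== SOURCE B (Python) =====
-- def comb_digits(num_list):
--     lens = [len(str(v)) for v in num_list]
--     total = sum(lens)
--     terms = []
--     shift = 1  # 10 ** (sum of lens of the elements after the current one)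
--     for v, l in zip(reversed(num_list), reversed(lens)):
--         terms.append(v * shift)
--         shift *= 10 ** l
--     terms.reverse()
--     out = []
--     pref = 0
--     safter = sum(terms)
--     for v, l, t in zip(num_list, lens, terms):
--         safter -= t
--         out.append(v * 10 ** (total - l) + pref // 10 ** l + safter)
--         pref += t
--     return out
-- ===== Notes on version B (the rewrite author's own statement) =====
-- stated objective: faster
-- what changed: Replaces the quadratic per-element inner fold over all other elements by a closed form: one reverse pass precomputes each element's suffix-shifted term, then a single forward pass with running prefix/suffix sums and an exact power-of-ten division builds every result in O(1) big-int operations.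
import Mathlib
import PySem

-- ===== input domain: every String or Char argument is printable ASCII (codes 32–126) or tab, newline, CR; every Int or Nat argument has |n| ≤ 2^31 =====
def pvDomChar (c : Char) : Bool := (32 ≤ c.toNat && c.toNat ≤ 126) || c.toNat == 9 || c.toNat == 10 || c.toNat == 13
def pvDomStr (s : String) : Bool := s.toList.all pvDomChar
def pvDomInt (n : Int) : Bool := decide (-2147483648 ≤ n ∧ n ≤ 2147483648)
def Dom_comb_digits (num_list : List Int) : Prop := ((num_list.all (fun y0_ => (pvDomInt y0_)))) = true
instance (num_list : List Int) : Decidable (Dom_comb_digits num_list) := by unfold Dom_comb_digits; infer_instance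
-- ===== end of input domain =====

-- B replaces A's quadratic per-element inner fold by precomputed suffix-shifted terms and
-- running prefix/suffix sums (one reverse pass + one forward pass): asymptotically faster.

-- shared helper: len(str(v)), the decimal-string length of v, as a Nat exponent
def dlen (v : Int) : Nat := (PySem.Str.len (PySem.Int.toStr v)).toNat

-- ===== PORT A =====
def comb_digits (num_list : List Int) : List Int :=
  (PySem.List.enumerate num_list 0).foldl (fun comb_list p =>
    let num0 : Int := 0 + PySem.List.pyGetD num_list p.1 0
    let num := (PySem.List.pyRange 0 (PySem.List.len num_list) 1).foldl
      (fun num j =>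
        if p.1 ≠ j then
          num * (10:Int) ^ dlen (PySem.List.pyGetD num_list j 0) + PySem.List.pyGetD num_list j 0
        else num) num0
    comb_list ++ [num]) []

-- ===== PORT B =====
def comb_digits_alt (num_list : List Int) : List Int :=
  let lens := num_list.map (fun v => dlen v)
  let total := lens.sum
  let st1 := (num_list.reverse.zip lens.reverse).foldl
      (fun (st : List Int × Int) (p : Int × Nat) =>
        (st.1 ++ [p.1 * st.2], st.2 * (10:Int) ^ p.2)) ([], 1)
  let terms := st1.1.reverse
  let st2 := (num_list.zip (lens.zip terms)).foldl
      (fun (st : List Int × Int × Int) (q : Int × Nat × Int) =>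
        (st.1 ++ [q.1 * (10:Int) ^ (total - q.2.1)
                    + PySem.Int.floordiv st.2.1 ((10:Int) ^ q.2.1)
                    + (st.2.2 - q.2.2)],
         st.2.1 + q.2.2, st.2.2 - q.2.2))
      ([], 0, terms.sum)
  st2.1

-- ===== PRECONDITION & SPEC =====
def Spec_comb_digits (num_list : List Int) (out : List Int) : Prop := out = comb_digits_alt num_list
instance (num_list : List Int) (out : List Int) : Decidable (Spec_comb_digits num_list out) := by unfold Spec_comb_digits; infer_instance

-- ===== CLAIM (what is proved, stated in full; the proofs are below) =====
def Claim_equal_comb_digits : Prop := ∀ (num_list : List Int), Dom_comb_digits num_list → Spec_comb_digits num_list (comb_digits num_list)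

-- ===== LEMMAS AND PROOFS =====

-- total decimal length of a list
def Lsum (xs : List Int) : Nat := (xs.map dlen).sum

-- value of concatenating the whole list (A's fold with initial accumulator 0)
def cval : List Int → Int
  | [] => 0
  | v :: rest => v * (10:Int) ^ Lsum rest + cval rest

-- per-element suffix-shifted terms (what B's first loop builds)
def tlist : List Int → List Int
  | [] => []
  | v :: rest => v * (10:Int) ^ Lsum rest :: tlist rest

-- the common value both programs produce for the element v between pre and suf
def target (pre : List Int) (v : Int) (suf : List Int) : Int :=
  v * (10:Int) ^ (Lsum pre + Lsum suf) + cval pre * (10:Int) ^ Lsum suf + cval suf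

-- the whole result, split-by-split
def res : List Int → List Int → List Int
  | _, [] => []
  | pre, v :: suf => target pre v suf :: res (pre ++ [v]) suf

theorem Lsum_cons (v : Int) (xs : List Int) : Lsum (v :: xs) = dlen v + Lsum xs := by
  simp [Lsum]

theorem Lsum_append (xs ys : List Int) : Lsum (xs ++ ys) = Lsum xs + Lsum ys := by
  simp [Lsum]

theorem cval_append (xs ys : List Int) :
    cval (xs ++ ys) = cval xs * (10:Int) ^ Lsum ys + cval ys := by
  induction xs with
  | nil => simp [cval]
  | cons v xs ih => simp only [List.cons_append, cval, ih, Lsum_append, pow_add]; ring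

theorem tlist_sum (xs : List Int) : (tlist xs).sum = cval xs := by
  induction xs <;> simp [tlist, cval, *]

theorem zip_self_map (l : List Int) : l.zip (l.map dlen) = l.map (fun v => (v, dlen v)) := by
  induction l <;> simp [*]

theorem loop1 (xs acc : List Int) :
    List.foldr (fun (p : Int × Nat) (st : List Int × Int) =>
        (st.1 ++ [p.1 * st.2], st.2 * (10:Int) ^ p.2))
      (acc, 1) (xs.map (fun v => (v, dlen v)))
    = (acc ++ (tlist xs).reverse, (10:Int) ^ Lsum xs) := by
  induction xs with
  | nil => simp [tlist, Lsum]
  | cons v xs ih =>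
    simp only [List.map_cons, List.foldr_cons, ih, tlist, Lsum_cons, pow_add,
      List.reverse_cons, List.append_assoc]
    exact Prod.ext rfl (by ring)

theorem loop2 (T : Nat) (suf : List Int) :
    ∀ (pre out0 : List Int), T = Lsum pre + Lsum suf →
    List.foldl (fun (st : List Int × Int × Int) (q : Int × Nat × Int) =>
        (st.1 ++ [q.1 * (10:Int) ^ (T - q.2.1)
                    + PySem.Int.floordiv st.2.1 ((10:Int) ^ q.2.1)
                    + (st.2.2 - q.2.2)],
         st.2.1 + q.2.2, st.2.2 - q.2.2))
      (out0, cval pre * (10:Int) ^ Lsum suf, cval suf)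
      (suf.zip ((suf.map dlen).zip (tlist suf)))
    = (out0 ++ res pre suf, cval (pre ++ suf), 0) := by
  induction suf with
  | nil => intro pre out0 _; simp [res, cval, Lsum]
  | cons v rest ih =>
    intro pre out0 hT
    have hd : ((10:Int) ^ dlen v) ≠ 0 := by positivity
    have hdiv : PySem.Int.floordiv (cval pre * (10:Int) ^ Lsum (v :: rest)) ((10:Int) ^ dlen v)
        = cval pre * (10:Int) ^ Lsum rest := by
      rw [PySem.Int.floordiv_eq_ediv_of_pos (by positivity)]
      rw [Lsum_cons, pow_add, ← mul_assoc, mul_right_comm]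
      exact Int.mul_ediv_cancel _ hd
    have hsaf : cval (v :: rest) - v * (10:Int) ^ Lsum rest = cval rest := by
      simp [cval]
    have hTd : T - dlen v = Lsum pre + Lsum rest := by
      rw [hT, Lsum_cons]; omega
    have hpref : cval pre * (10:Int) ^ Lsum (v :: rest) + v * (10:Int) ^ Lsum rest
        = cval (pre ++ [v]) * (10:Int) ^ Lsum rest := by
      rw [cval_append, Lsum_cons]
      simp [cval, Lsum, pow_add]; ring
    simp only [List.map_cons, tlist, List.zip_cons_cons, List.foldl_cons]
    rw [hdiv, hsaf, hTd, hpref]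
    have hout : v * (10:Int) ^ (Lsum pre + Lsum rest) + cval pre * (10:Int) ^ Lsum rest + cval rest
        = target pre v rest := rfl
    rw [hout, ih (pre ++ [v]) (out0 ++ [target pre v rest])
        (by rw [hT, Lsum_append, Lsum_cons, Lsum_cons]; simp [Lsum]; omega)]
    simp [res, List.append_assoc]

theorem comb_digits_B_eq (num_list : List Int) : comb_digits_alt num_list = res [] num_list := by
  have h1 : num_list.reverse.zip ((num_list.map dlen).reverse)
      = (num_list.map (fun v => (v, dlen v))).reverse := by
    rw [← List.map_reverse, zip_self_map, List.map_reverse]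
  simp only [comb_digits_alt, h1, List.foldl_reverse, loop1, List.nil_append,
    List.reverse_reverse, tlist_sum]
  have h0 : (0:Int) = cval [] * (10:Int) ^ Lsum num_list := by simp [cval]
  have h3 : List.map (fun v => dlen v) num_list = List.map dlen num_list := rfl
  have h4 : (List.map dlen num_list).sum = Lsum num_list := rfl
  rw [h3, h4, h0, loop2 (Lsum num_list) num_list [] [] (by simp [Lsum])]
  simp

theorem gfold_closed (xs : List Int) (acc : Int) :
    xs.foldl (fun num v => num * (10:Int) ^ dlen v + v) acc
      = acc * (10:Int) ^ Lsum xs + cval xs := by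
  induction xs generalizing acc with
  | nil => simp [cval, Lsum]
  | cons v rest ih => simp only [List.foldl_cons, ih, cval, Lsum_cons, pow_add]; ring

theorem A_index (xs : List Int) (k : Nat) (hk : k < xs.length) :
    (List.map (fun i : Nat => (i : Int)) (List.range xs.length)).foldl
      (fun num j =>
        if (k : Int) ≠ j then
          num * (10:Int) ^ dlen (PySem.List.pyGetD xs j 0) + PySem.List.pyGetD xs j 0
        else num) (0 + PySem.List.pyGetD xs (k : Int) 0)
    = target (xs.take k) (xs.getD k 0) (xs.drop (k + 1)) := by
  rw [← PySem.List.pyRange_zero_nat]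
  have hsplit : PySem.List.pyRange 0 (xs.length : Int)
      = PySem.List.pyRange 0 (k : Int) ++ ((k : Int) :: PySem.List.pyRange ((k : Int) + 1) (xs.length : Int)) := by
    rw [PySem.List.pyRange_one_append 0 (k : Int) (xs.length : Int) (by omega) (by exact_mod_cast hk.le)]
    congr 1
    exact PySem.List.pyRange_one_cons (by exact_mod_cast hk)
  rw [hsplit, List.foldl_append, List.foldl_cons]
  have hmid : ∀ num : Int, (if (k : Int) ≠ (k : Int) then
      num * (10:Int) ^ dlen (PySem.List.pyGetD xs (k : Int) 0) + PySem.List.pyGetD xs (k : Int) 0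
      else num) = num := by intro num; simp
  rw [hmid]
  have hlen1 : (xs.take k).length = k := by simp [hk.le]
  have hseg1 : ∀ acc : Int, (PySem.List.pyRange 0 (k : Int)).foldl
      (fun num j =>
        if (k : Int) ≠ j then
          num * (10:Int) ^ dlen (PySem.List.pyGetD xs j 0) + PySem.List.pyGetD xs j 0
        else num) acc
      = (xs.take k).foldl (fun num v => num * (10:Int) ^ dlen v + v) acc := by
    intro acc
    rw [PySem.List.foldl_congr_mem _ _
        (fun num j => num * (10:Int) ^ dlen (PySem.List.pyGetD (xs.take k) j 0)
          + PySem.List.pyGetD (xs.take k) j 0) acc ?_]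
    · rw [show ((k : Nat) : Int) = ((xs.take k).length : Int) by rw [hlen1]]
      have h := PySem.List.foldl_pyRange_pyGetD' (xs.take k) 0
        (fun num v => num * (10:Int) ^ dlen v + v) acc (a := 0) le_rfl
      simpa using h
    · intro acc j hj
      rw [PySem.List.mem_pyRange_one] at hj
      have hne : (k : Int) ≠ j := by omega
      have hget : PySem.List.pyGetD xs j 0 = PySem.List.pyGetD (xs.take k) j 0 := by
        rw [PySem.List.pyGetD_of_nonneg xs 0 hj.1, PySem.List.pyGetD_of_nonneg (xs.take k) 0 hj.1]
        have hjk : j.toNat < k := by omega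
        simp [List.getD, hjk]
      rw [if_pos hne, hget]
  have hseg2 : ∀ acc : Int, (PySem.List.pyRange ((k : Int) + 1) (xs.length : Int)).foldl
      (fun num j =>
        if (k : Int) ≠ j then
          num * (10:Int) ^ dlen (PySem.List.pyGetD xs j 0) + PySem.List.pyGetD xs j 0
        else num) acc
      = (xs.drop (k + 1)).foldl (fun num v => num * (10:Int) ^ dlen v + v) acc := by
    intro acc
    rw [PySem.List.foldl_congr_mem _ _
        (fun num j => num * (10:Int) ^ dlen (PySem.List.pyGetD xs j 0)
          + PySem.List.pyGetD xs j 0) acc ?_]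
    · have := PySem.List.foldl_pyRange_pyGetD' xs 0
        (fun num v => num * (10:Int) ^ dlen v + v) acc (a := (k : Int) + 1) (by omega)
      rw [this, show ((k : Int) + 1).toNat = k + 1 by omega]
    · intro acc j hj
      rw [PySem.List.mem_pyRange_one] at hj
      have hne : (k : Int) ≠ j := by omega
      rw [if_pos hne]
  rw [hseg1, hseg2, PySem.List.pyGetD_natCast, zero_add, gfold_closed, gfold_closed]
  simp only [target, pow_add]
  ring

theorem map_range_res (xs : List Int) : ∀ pre : List Int,
    (List.range xs.length).map
      (fun k => target (pre ++ xs.take k) (xs.getD k 0) (xs.drop (k + 1))) = res pre xs := by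
  induction xs with
  | nil => intro pre; simp [res]
  | cons v rest ih =>
    intro pre
    simp only [List.length_cons, List.range_succ_eq_map, List.map_cons, List.map_map]
    rw [res]
    congr 1
    · simp [target]
    · rw [← ih (pre ++ [v])]
      apply List.map_congr_left
      intro k _
      simp only [Function.comp_apply, List.take_succ_cons, List.drop_succ_cons, List.getD_cons_succ]
      rw [show pre ++ v :: rest.take k = (pre ++ [v]) ++ rest.take k by simp]

theorem comb_digits_A_eq (num_list : List Int) : comb_digits num_list = res [] num_list := by
  simp only [comb_digits, PySem.List.foldl_append_singleton_eq_map, List.nil_append]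
  rw [PySem.List.enumerate_eq_map_pyRange num_list 0, List.map_map]
  simp only [PySem.List.len_eq, PySem.List.pyRange_zero_nat, List.map_map]
  rw [← map_range_res num_list []]
  apply List.map_congr_left
  intro k hk
  rw [List.mem_range] at hk
  simp only [Function.comp_apply, List.nil_append]
  exact A_index num_list k hk

-- ===== VERDICT (by name: the statement is the Claim_ definition above) =====
theorem comb_digits_spec : Claim_equal_comb_digits := by
  intro xs _
  unfold Spec_comb_digits
  rw [comb_digits_A_eq, comb_digits_B_eq]
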